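-- pv_equiv track=rewrite | github.com/jo74ramon/PhaseShift | Tiktakto.py | getMovesMap
-- ===== SOURCE A (Python) =====
-- def getMovesMap(board):
--     '''Build dictionary mapping single digit user input to board position; return
--     movesmap so that we can use dictionary to map user input for moves'''
--
--     movesmap = {}
--     i = 0
--     for row in range(0, len(board), 2):
--         movesmap[row + (i + 1)] = [row, 0]
--         movesmap[row + 2 + i] = [row, 2]
--         movesmap[row + 4 + (i - 1)] = [row, 4]
--         i += 1
--
--     return movesmap
-- ===== SOURCE B (Python) =====
-- def getMovesMap(board):
--     '''Build dictionary mapping single digit user input to board position.'''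
--     n = (len(board) + 1) // 2
--     movesmap = {}
--     for k in range(1, 3 * n + 1):
--         idx = k - 1
--         movesmap[k] = [2 * (idx // 3), 2 * (idx % 3)]
--     return movesmap
-- ===== Notes on version B (the rewrite author's own statement) =====
-- stated objective: alternative
-- what changed: B computes the number of active rows up front and iterates over the output keys 1..3n, recovering each board position by divmod on the key, instead of A's loop over even row indices emitting three formula-based keys per row with an auxiliary counter.
import Mathlib
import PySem

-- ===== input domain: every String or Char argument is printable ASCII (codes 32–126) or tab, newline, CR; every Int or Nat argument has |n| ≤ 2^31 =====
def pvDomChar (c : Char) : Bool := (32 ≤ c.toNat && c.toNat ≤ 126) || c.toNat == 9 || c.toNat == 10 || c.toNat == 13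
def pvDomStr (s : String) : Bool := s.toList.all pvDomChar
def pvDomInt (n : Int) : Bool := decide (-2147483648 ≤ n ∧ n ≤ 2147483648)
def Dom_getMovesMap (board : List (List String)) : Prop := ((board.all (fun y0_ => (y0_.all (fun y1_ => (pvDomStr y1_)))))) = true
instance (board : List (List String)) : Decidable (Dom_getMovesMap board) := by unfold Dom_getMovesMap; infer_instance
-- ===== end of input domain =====

-- B iterates over the output keys 1..3n (n = number of active rows) and recovers each
-- position by divmod on the key, instead of A's row loop with an auxiliary counter;
-- objective: alternative decomposition, same cost.


-- ===== PORT A =====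
-- for row in range(0, len(board), 2): three inserts with counter i, then i += 1
def getMovesMap (board : List (List String)) : List (Int × List Int) :=
  let res := (PySem.List.pyRange 0 (board.length : Int) 2).foldl
    (fun (st : PySem.Dict Int (List Int) × Int) (row : Int) =>
      ((((st.1.insert (row + (st.2 + 1)) [row, 0]).insert
            (row + 2 + st.2) [row, 2]).insert
            (row + 4 + (st.2 - 1)) [row, 4]), st.2 + 1))
    (PySem.Dict.empty, 0)
  res.1.items

-- ===== PORT B =====
-- n = (len(board)+1)//2; for k in range(1, 3*n+1): movesmap[k] = [2*((k-1)//3), 2*((k-1)%3)]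
def getMovesMap_alt (board : List (List String)) : List (Int × List Int) :=
  let n : Int := PySem.Int.floordiv ((board.length : Int) + 1) 2
  ((PySem.List.pyRange 1 (3 * n + 1) 1).foldl
    (fun (d : PySem.Dict Int (List Int)) (k : Int) =>
      d.insert k [2 * PySem.Int.floordiv (k - 1) 3, 2 * PySem.Int.mod (k - 1) 3])
    PySem.Dict.empty).items

-- ===== PRECONDITION & SPEC =====
def Spec_getMovesMap (board : List (List String)) (out : List (Int × List Int)) : Prop := out = getMovesMap_alt board
instance (board : List (List String)) (out : List (Int × List Int)) : Decidable (Spec_getMovesMap board out) := by unfold Spec_getMovesMap; infer_instance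

-- ===== CLAIM (what is proved, stated in full; the proofs are below) =====
def Claim_equal_getMovesMap : Prop := ∀ (board : List (List String)), Dom_getMovesMap board → Spec_getMovesMap board (getMovesMap board)

-- ===== LEMMAS AND PROOFS =====

-- the common association list both ports build, for n active rows
def pvTgt (n : Nat) : List (Int × List Int) :=
  (List.range (3 * n)).map
    (fun (j : Nat) => (((j : Int) + 1), [((2 * (j / 3) : Nat) : Int), ((2 * (j % 3) : Nat) : Int)]))

theorem pvTgt_key_le (n : Nat) (p : Int × List Int) (hp : p ∈ pvTgt n) : p.1 ≤ (3 * n : Nat) := by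
  unfold pvTgt at hp
  rcases List.mem_map.mp hp with ⟨j, hj, rfl⟩
  have := List.mem_range.mp hj
  simp only []
  exact_mod_cast this

theorem pvMk_insert_fresh (l : List (Int × List Int)) (k : Int) (v : List Int)
    (h : ∀ p ∈ l, p.1 ≠ k) :
    (PySem.Dict.mk l).insert k v = PySem.Dict.mk (l ++ [(k, v)]) := by
  have hc : (PySem.Dict.mk l).contains k = false := by
    rw [PySem.Dict.contains_eq_decide_mem_keys]
    simp only [PySem.Dict.keys_mk, decide_eq_false_iff_not, List.mem_map]
    rintro ⟨p, hp, hpk⟩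
    exact h p hp hpk
  apply PySem.Dict.ext
  rw [PySem.Dict.items_insert_of_not_contains _ _ hc]

theorem pvTgt_succ (n : Nat) :
    pvTgt (n + 1) = pvTgt n ++
      [(((3 * n : Nat) : Int) + 1, [((2 * n : Nat) : Int), (0 : Int)]),
       (((3 * n : Nat) : Int) + 2, [((2 * n : Nat) : Int), (2 : Int)]),
       (((3 * n : Nat) : Int) + 3, [((2 * n : Nat) : Int), (4 : Int)])] := by
  unfold pvTgt
  have h3 : 3 * (n + 1) = 3 * n + 1 + 1 + 1 := by omega
  rw [h3, List.range_succ, List.range_succ, List.range_succ, List.map_append,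
      List.map_append, List.map_append]
  simp only [List.map_cons, List.map_nil, List.append_assoc]
  congr 1
  have e1 : (3 * n) / 3 = n := by omega
  have e2 : (3 * n) % 3 = 0 := by omega
  have e3 : (3 * n + 1) / 3 = n := by omega
  have e4 : (3 * n + 1) % 3 = 1 := by omega
  have e5 : (3 * n + 1 + 1) / 3 = n := by omega
  have e6 : (3 * n + 1 + 1) % 3 = 2 := by omega
  simp only [e1, e2, e3, e4, e5, e6]
  push_cast
  norm_num
  omega

-- A's loop over the first n even rows produces exactly pvTgt n with counter n
theorem pvA_loop (n : Nat) :
    (List.range n).foldl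
      (fun (x : PySem.Dict Int (List Int) × Int) (y : Nat) =>
        ((((x.1.insert (2 * (y : Int) + (x.2 + 1)) [2 * (y : Int), 0]).insert
              (2 * (y : Int) + 2 + x.2) [2 * (y : Int), 2]).insert
              (2 * (y : Int) + 4 + (x.2 - 1)) [2 * (y : Int), 4]), x.2 + 1))
      (PySem.Dict.empty, 0)
    = (PySem.Dict.mk (pvTgt n), (n : Int)) := by
  induction n with
  | zero =>
    simp [pvTgt, PySem.Dict.empty]
  | succ m ih =>
    rw [List.range_succ, List.foldl_append, ih]
    simp only [List.foldl_cons, List.foldl_nil]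
    have key1 : 2 * (m : Int) + ((m : Int) + 1) = ((3 * m : Nat) : Int) + 1 := by push_cast; ring
    have key2 : 2 * (m : Int) + 2 + (m : Int) = ((3 * m : Nat) : Int) + 2 := by push_cast; ring
    have key3 : 2 * (m : Int) + 4 + ((m : Int) - 1) = ((3 * m : Nat) : Int) + 3 := by push_cast; ring
    have hrow : 2 * (m : Int) = ((2 * m : Nat) : Int) := by push_cast; ring
    have hb1 : ∀ p ∈ pvTgt m, p.1 ≠ ((3 * m : Nat) : Int) + 1 := by
      intro p hp
      have := pvTgt_key_le m p hp
      omega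
    have hb2 : ∀ p ∈ pvTgt m ++ [(((3 * m : Nat) : Int) + 1, [((2 * m : Nat) : Int), (0 : Int)])],
        p.1 ≠ ((3 * m : Nat) : Int) + 2 := by
      intro p hp
      rcases List.mem_append.mp hp with h | h
      · have := pvTgt_key_le m p h; omega
      · rw [List.mem_singleton] at h; subst h; simp
    have hb3 : ∀ p ∈ (pvTgt m ++ [(((3 * m : Nat) : Int) + 1, [((2 * m : Nat) : Int), (0 : Int)])]) ++
          [(((3 * m : Nat) : Int) + 2, [((2 * m : Nat) : Int), (2 : Int)])],
        p.1 ≠ ((3 * m : Nat) : Int) + 3 := by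
      intro p hp
      rcases List.mem_append.mp hp with h | h
      · rcases List.mem_append.mp h with h' | h'
        · have := pvTgt_key_le m p h'; omega
        · rw [List.mem_singleton] at h'; subst h'; simp
      · rw [List.mem_singleton] at h; subst h; simp
    rw [key1, key2, key3]
    simp only [hrow]
    rw [pvMk_insert_fresh _ _ _ hb1, pvMk_insert_fresh _ _ _ hb2, pvMk_insert_fresh _ _ _ hb3]
    rw [pvTgt_succ]
    refine Prod.ext ?_ ?_
    · simp [List.append_assoc]
    · push_cast; ring

theorem pvA_eq (board : List (List String)) :
    getMovesMap board = pvTgt ((board.length + 1) / 2) := by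
  simp only [getMovesMap]
  rw [PySem.List.pyRange_of_pos 0 (board.length : Int) (by norm_num : (0:Int) < 2)]
  have hm : (if (0:Int) < (board.length : Int)
        then (((board.length : Int) - 0 + 2 - 1) / 2).toNat else 0)
      = (board.length + 1) / 2 := by
    split_ifs with h
    · omega
    · omega
  rw [hm, List.foldl_map]
  simp only [zero_add]
  rw [pvA_loop]

theorem pvB_eq (board : List (List String)) :
    getMovesMap_alt board = pvTgt ((board.length + 1) / 2) := by
  simp only [getMovesMap_alt]
  have hn : PySem.Int.floordiv ((board.length : Int) + 1) 2
      = (((board.length + 1) / 2 : Nat) : Int) := by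
    rw [PySem.Int.floordiv_eq_ediv_of_pos (by norm_num : (0:Int) < 2)]
    omega
  rw [hn]
  generalize (board.length + 1) / 2 = n
  have hrange : PySem.List.pyRange 1 (3 * ((n : Nat) : Int) + 1) 1
      = (List.range (3 * n)).map (fun (k : Nat) => (1 : Int) + (k : Int)) := by
    rw [PySem.List.pyRange_one]
    congr 2
    omega
  rw [hrange]
  rw [PySem.Dict.items_foldl_insert_fresh _ (fun k => k)
        (fun k => [2 * PySem.Int.floordiv (k - 1) 3, 2 * PySem.Int.mod (k - 1) 3])
        PySem.Dict.empty
        (by intro a _; exact PySem.Dict.contains_empty a)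
        (by
          simp only [List.map_id']
          refine (List.nodup_range).map ?_
          intro a b h
          simpa using h)]
  have hemp : (PySem.Dict.empty : PySem.Dict Int (List Int)).items = [] := rfl
  rw [hemp, List.nil_append, List.map_map]
  unfold pvTgt
  apply List.map_congr_left
  intro j _
  simp only [Function.comp]
  have hid : (1 : Int) + (j : Int) - 1 = (j : Int) := by ring
  rw [hid]
  have hd : PySem.Int.floordiv (j : Int) 3 = ((j / 3 : Nat) : Int) := by
    rw [PySem.Int.floordiv_eq_ediv_of_pos (by norm_num : (0:Int) < 3)]
    omega
  have hmm : PySem.Int.mod (j : Int) 3 = ((j % 3 : Nat) : Int) := by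
    rw [PySem.Int.mod_eq_emod_of_pos (by norm_num : (0:Int) < 3)]
    omega
  rw [hd, hmm]
  refine Prod.ext ?_ ?_
  · ring
  · simp only [List.cons.injEq, and_true]
    refine ⟨by push_cast; ring, by push_cast; ring⟩

-- ===== VERDICT (by name: the statement is the Claim_ definition above) =====
theorem getMovesMap_spec : Claim_equal_getMovesMap := by
  intro board _
  unfold Spec_getMovesMap
  rw [pvA_eq, pvB_eq]
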